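-- pv_equiv track=rewrite | github.com/shahed-shd/Enrollment-system | main.py | find_next_roll_to_have
-- ===== SOURCE A (Python) =====
-- def find_next_roll_to_have(L, start):
--     if not L:
--         return start
--
--     if L[0] != start:
--         return start
--
--     len_L = len(L)
--
--     if len_L > 1:
--         for i in range(1, len_L):
--             if not L[i-1]+1 == L[i]:
--                 return L[i-1] + 1
--
--     return L[-1] + 1
-- ===== SOURCE B (Python) =====
-- def find_next_roll_to_have(L, start):
--     # Divide and conquer: the answer is start + r, where r is the length of
--     # the longest prefix with L[i] == start + i.  run(lo, hi) computes that
--     # run length for the segment [lo, hi); the right half only contributes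
--     # when the entire left half matches.
--     def run(lo, hi):
--         if hi - lo <= 1:
--             return 0 if lo == hi or L[lo] != start + lo else hi - lo
--         mid = (lo + hi) // 2
--         r = run(lo, mid)
--         if r < mid - lo:
--             return r
--         return (mid - lo) + run(mid, hi)
--     return start + run(0, len(L))
-- ===== Notes on version B (the rewrite author's own statement) =====
-- stated objective: alternative
-- what changed: Replaces A's linear adjacent-gap scan (L[i-1]+1 == L[i] with special cases for empty list, first element and L[-1]+1) by a divide-and-conquer computation of the longest prefix length r with L[i] == start+i, returning start + r; the right half of a segment is descended only when the whole left half matches.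
import Mathlib
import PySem

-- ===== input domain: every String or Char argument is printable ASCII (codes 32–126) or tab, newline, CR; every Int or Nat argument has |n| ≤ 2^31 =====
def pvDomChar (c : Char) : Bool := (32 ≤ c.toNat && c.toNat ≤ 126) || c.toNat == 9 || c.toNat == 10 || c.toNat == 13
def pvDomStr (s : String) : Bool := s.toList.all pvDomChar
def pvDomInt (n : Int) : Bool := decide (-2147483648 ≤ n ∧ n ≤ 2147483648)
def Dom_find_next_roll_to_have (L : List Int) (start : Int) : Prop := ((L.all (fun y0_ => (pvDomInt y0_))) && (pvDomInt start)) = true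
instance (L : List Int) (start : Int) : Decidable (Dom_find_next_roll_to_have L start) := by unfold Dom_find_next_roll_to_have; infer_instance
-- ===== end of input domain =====

-- B replaces A's linear adjacent-gap scan by a divide-and-conquer computation of the
-- longest prefix length r with L[i] = start+i, returning start + r (objective: alternative).

-- ===== PORT A =====
-- the for-loop over range(1, len_L): carries the previous element; returns L[-1]+1 when it falls off the end
def pvALoop (prev : Int) : List Int → Int
  | [] => prev + 1
  | cur :: rest => if ¬ (prev + 1 = cur) then prev + 1 else pvALoop cur rest

def find_next_roll_to_have (L : List Int) (start : Int) : Int :=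
  match L with
  | [] => start
  | x :: rest =>
    if x ≠ start then start
    else pvALoop x rest

-- ===== PORT B =====
-- run(lo, hi) of Source B; structural fuel ≥ hi - lo only makes the halving recursion total
-- (the 0-fuel branch is unreachable); L[lo] is read only with lo < hi ≤ len(L), so List.getD is exact there
def pvRun (L : List Int) (start : Int) : Nat → Nat → Nat → Nat
  | 0, _, _ => 0
  | fuel + 1, lo, hi =>
    if hi - lo ≤ 1 then
      (if lo = hi ∨ L.getD lo 0 ≠ start + (lo : Int) then 0 else hi - lo)
    else
      let mid := (lo + hi) / 2
      let r := pvRun L start fuel lo mid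
      if r < mid - lo then r else (mid - lo) + pvRun L start fuel mid hi

def find_next_roll_to_have_alt (L : List Int) (start : Int) : Int :=
  start + (pvRun L start L.length 0 L.length : Int)

-- ===== PRECONDITION & SPEC =====
def Spec_find_next_roll_to_have (L : List Int) (start : Int) (out : Int) : Prop := out = find_next_roll_to_have_alt L start
instance (L : List Int) (start : Int) (out : Int) : Decidable (Spec_find_next_roll_to_have L start out) := by unfold Spec_find_next_roll_to_have; infer_instance

-- ===== CLAIM (what is proved, stated in full; the proofs are below) =====
def Claim_equal_find_next_roll_to_have : Prop := ∀ (L : List Int) (start : Int), Dom_find_next_roll_to_have L start → Spec_find_next_roll_to_have L start (find_next_roll_to_have L start)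

-- ===== LEMMAS AND PROOFS =====

-- reference count: length of the longest prefix of xs matching v, v+1, v+2, …
def pvCntL (xs : List Int) (v : Int) : Nat :=
  match xs with
  | [] => 0
  | x :: r => if x = v then 1 + pvCntL r (v + 1) else 0

theorem pvCntL_append (s : List Int) : ∀ (t : List Int) (v : Int),
    pvCntL (s ++ t) v =
      (if pvCntL s v < s.length then pvCntL s v else s.length + pvCntL t (v + (s.length : Int))) := by
  induction s with
  | nil => intro t v; simp [pvCntL]
  | cons x s ih =>
      intro t v
      simp only [List.cons_append, pvCntL, List.length_cons]
      by_cases h : x = v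
      · rw [if_pos h, if_pos h, ih t (v + 1)]
        have hc : v + 1 + (s.length : Int) = v + ((s.length + 1 : Nat) : Int) := by push_cast; ring
        rw [hc]
        split_ifs <;> omega
      · rw [if_neg h, if_neg h, if_pos (by omega)]

-- the main invariant: with enough fuel, run(lo, hi) is the matching-run length of the segment [lo, hi)
theorem pvRun_eq_cntL (L : List Int) (start : Int) : ∀ (fuel lo hi : Nat),
    hi - lo ≤ fuel → hi ≤ L.length →
    pvRun L start fuel lo hi = pvCntL ((L.drop lo).take (hi - lo)) (start + (lo : Int)) := by
  intro fuel
  induction fuel with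
  | zero =>
      intro lo hi h1 _
      rw [show hi - lo = 0 from by omega]
      simp [pvRun, pvCntL]
  | succ fuel ih =>
      intro lo hi h1 h2
      rw [pvRun]
      by_cases hb : hi - lo ≤ 1
      · rw [if_pos hb]
        by_cases hz : hi - lo = 0
        · rw [hz]
          simp only [List.take_zero, pvCntL]
          split_ifs <;> rfl
        · have h1' : hi - lo = 1 := by omega
          have hlo : lo < L.length := by omega
          have hd : L.drop lo = L[lo] :: L.drop (lo + 1) := List.drop_eq_getElem_cons hlo
          rw [h1', hd]
          simp only [List.take_succ_cons, List.take_zero, pvCntL]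
          have hg : L.getD lo 0 = L[lo] := List.getD_eq_getElem L 0 hlo
          by_cases hm : L[lo] = start + (lo : Int)
          · rw [if_pos hm,
                if_neg (by rw [not_or, hg]; exact ⟨by omega, not_not_intro hm⟩)]
          · rw [if_neg hm, if_pos (Or.inr (by rw [hg]; exact hm))]
      · rw [if_neg hb]
        simp only
        have hlm : lo < (lo + hi) / 2 := by omega
        have hmh : (lo + hi) / 2 < hi := by omega
        rw [ih lo ((lo + hi) / 2) (by omega) (by omega),
            ih ((lo + hi) / 2) hi (by omega) h2]
        have hseg : (L.drop lo).take (hi - lo) =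
            (L.drop lo).take ((lo + hi) / 2 - lo) ++ (L.drop ((lo + hi) / 2)).take (hi - (lo + hi) / 2) := by
          rw [show hi - lo = ((lo + hi) / 2 - lo) + (hi - (lo + hi) / 2) from by omega,
              List.take_add, List.drop_drop,
              show lo + ((lo + hi) / 2 - lo) = (lo + hi) / 2 from by omega]
        rw [hseg, pvCntL_append]
        have hlen : ((L.drop lo).take ((lo + hi) / 2 - lo)).length = (lo + hi) / 2 - lo := by
          rw [List.length_take, List.length_drop]
          omega
        rw [hlen]
        have hc : start + (lo : Int) + (((lo + hi) / 2 - lo : Nat) : Int) = start + (((lo + hi) / 2 : Nat) : Int) := by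
          rw [Nat.cast_sub (le_of_lt hlm)]
          ring
        rw [hc]

-- A's loop in terms of the reference count
theorem pvALoop_eq_cntL (rest : List Int) : ∀ prev : Int,
    pvALoop prev rest = prev + 1 + (pvCntL rest (prev + 1) : Int) := by
  induction rest with
  | nil => intro prev; simp [pvALoop, pvCntL]
  | cons cur r ih =>
      intro prev
      simp only [pvALoop, pvCntL]
      by_cases h : cur = prev + 1
      · rw [if_neg (by omega), if_pos h, ih cur, h]
        push_cast
        ring
      · rw [if_pos (by omega), if_neg h]
        simp

-- ===== VERDICT (by name: the statement is the Claim_ definition above) =====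
theorem find_next_roll_to_have_spec : Claim_equal_find_next_roll_to_have := by
  unfold Claim_equal_find_next_roll_to_have
  intro L start _
  unfold Spec_find_next_roll_to_have find_next_roll_to_have find_next_roll_to_have_alt
  rw [pvRun_eq_cntL L start L.length 0 L.length (by omega) (by omega)]
  simp only [List.drop_zero, Nat.sub_zero, List.take_length, Nat.cast_zero, add_zero]
  cases L with
  | nil => simp [pvCntL]
  | cons x rest =>
    simp only [pvCntL]
    by_cases h : x = start
    · subst h
      rw [if_neg (by simp), if_pos rfl, pvALoop_eq_cntL]
      push_cast
      ring
    · rw [if_pos h, if_neg h]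
      simp
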